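-- pv_equiv track=rewrite | github.com/sepandar-sepehr/advent-of-code | 2023/d13_2.py | is_mirror_at_row
-- ===== SOURCE A (Python) =====
-- def is_mirror_at_row(pattern, idx):
--     if idx == len(pattern)-1:
--         return False
--     for i in range(0, idx+1):
--         if ((idx-i) >= 0 and (idx+i+1) < len(pattern)
--                 and pattern[idx+i+1] != pattern[idx-i]):
--             return False
--     return True
-- ===== SOURCE B (Python) =====
-- def is_mirror_at_row(pattern, idx):
--     if idx == len(pattern) - 1:
--         return False
--     m = min(idx + 1, len(pattern) - idx - 1)
--     window = pattern[idx + 1 - m : idx + 1 + m]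
--     return window == window[::-1]
-- ===== Notes on version B (the rewrite author's own statement) =====
-- stated objective: simpler
-- what changed: Instead of A's guarded index-arithmetic loop comparing rows pairwise across the line, B computes the overlap width m, extracts the symmetric window pattern[idx+1-m : idx+1+m] centered on the mirror line, and returns whether that window equals its own reverse (a palindrome test by whole-list comparison, no pairwise loop); Pre_ excludes negative idx, which is not a valid mirror-row position and on which A's vacuous True and B's wrapped-slice palindrome are both unspecified corner behaviour.
-- outside the precondition, e.g. on is_mirror_at_row(['a', 'b', 'c', 'd'], -2): A returns True, B returns False
import Mathlib
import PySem

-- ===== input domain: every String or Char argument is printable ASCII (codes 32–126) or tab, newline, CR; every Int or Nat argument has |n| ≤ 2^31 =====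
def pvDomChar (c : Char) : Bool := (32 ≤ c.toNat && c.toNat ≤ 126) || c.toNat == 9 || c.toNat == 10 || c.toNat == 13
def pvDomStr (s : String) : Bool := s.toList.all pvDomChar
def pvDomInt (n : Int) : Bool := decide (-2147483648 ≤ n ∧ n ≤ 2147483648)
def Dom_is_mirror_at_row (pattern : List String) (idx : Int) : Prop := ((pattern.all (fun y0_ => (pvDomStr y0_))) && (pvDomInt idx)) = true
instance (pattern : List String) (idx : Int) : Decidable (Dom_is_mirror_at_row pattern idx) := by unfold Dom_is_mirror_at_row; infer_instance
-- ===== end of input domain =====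

-- B replaces A's guarded index-arithmetic loop by extracting the symmetric window around the mirror line and testing it for palindromicity by whole-list reverse comparison (simpler decomposition, same cost); equivalence proved for 0 ≤ idx.


-- ===== PORT A =====
def isMirrorLoopA (pattern : List String) (idx : Int) : List Int → Bool
  | [] => true
  | i :: rest =>
    if (decide (0 ≤ idx - i) && decide (idx + i + 1 < (pattern.length : Int)))
        && (PySem.List.pyGet? pattern (idx + i + 1) != PySem.List.pyGet? pattern (idx - i)) then
      false
    else isMirrorLoopA pattern idx rest

def is_mirror_at_row (pattern : List String) (idx : Int) : Bool :=
  if idx = (pattern.length : Int) - 1 then false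
  else isMirrorLoopA pattern idx (PySem.List.pyRange 0 (idx + 1) 1)

-- ===== PORT B =====
def is_mirror_at_row_alt (pattern : List String) (idx : Int) : Bool :=
  if idx = (pattern.length : Int) - 1 then false
  else
    let m := min (idx + 1) ((pattern.length : Int) - idx - 1)
    let window := PySem.List.slice pattern (some (idx + 1 - m)) (some (idx + 1 + m))
    window == window.reverse

-- ===== PRECONDITION & SPEC =====
-- Pre_ excludes negative idx, which is not a valid mirror-row position: there A's loop checks no
-- pairs and returns a vacuous True while B's Python slice wraps around the end of the list, and
-- neither value is specified behaviour of the function.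
def Pre_is_mirror_at_row (pattern : List String) (idx : Int) : Prop := 0 ≤ idx
instance (pattern : List String) (idx : Int) : Decidable (Pre_is_mirror_at_row pattern idx) := by unfold Pre_is_mirror_at_row; infer_instance

def pvWitness_is_mirror_at_row : List String × Int := (["ab", "ab"], 0)

def Spec_is_mirror_at_row (pattern : List String) (idx : Int) (out : Bool) : Prop := out = is_mirror_at_row_alt pattern idx
instance (pattern : List String) (idx : Int) (out : Bool) : Decidable (Spec_is_mirror_at_row pattern idx out) := by unfold Spec_is_mirror_at_row; infer_instance

-- ===== CLAIM (what is proved, stated in full; the proofs are below) =====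
def Claim_equal_is_mirror_at_row : Prop := ∀ (pattern : List String) (idx : Int), Dom_is_mirror_at_row pattern idx → Pre_is_mirror_at_row pattern idx → Spec_is_mirror_at_row pattern idx (is_mirror_at_row pattern idx)

-- ===== LEMMAS AND PROOFS =====

theorem loopA_eq_all (pattern : List String) (idx : Int) (l : List Int) :
    isMirrorLoopA pattern idx l =
      l.all (fun i => !((decide (0 ≤ idx - i) && decide (idx + i + 1 < (pattern.length : Int)))
        && (PySem.List.pyGet? pattern (idx + i + 1) != PySem.List.pyGet? pattern (idx - i)))) := by
  induction l with
  | nil => rfl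
  | cons i rest ih =>
    simp only [isMirrorLoopA, List.all_cons]
    split
    · next h => rw [h]; simp only [Bool.not_true, Bool.false_and]
    · next h =>
      rw [Bool.not_eq_true] at h
      rw [h]
      simp only [Bool.not_false, Bool.true_and, ih]

-- A's loop is true exactly when all overlapping row pairs around the line match.
theorem allA_iff (pattern : List String) (k : Nat) :
    (isMirrorLoopA pattern (k : Int) (PySem.List.pyRange 0 ((k : Int) + 1) 1) = true) ↔
      (∀ i, i < min (k + 1) (pattern.length - (k + 1)) →
        pattern[k + 1 + i]? = pattern[k - i]?) := by
  rw [loopA_eq_all]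
  rw [show ((k : Int) + 1) = ((k + 1 : Nat) : Int) by push_cast; ring, PySem.List.pyRange_zero_natCast]
  simp only [List.all_map, List.all_eq_true, List.mem_range]
  constructor
  · intro H i hi
    have hik : i < k + 1 := by omega
    have hlen : k + 1 + i < pattern.length := by omega
    have := H i hik
    simp only [Function.comp, Bool.not_eq_true', Bool.and_eq_false_iff, decide_eq_false_iff_not,
      bne_eq_false_iff_eq, not_le, not_lt] at this
    rcases this with (h | h) | h
    · omega
    · exfalso; omega
    · rw [show ((k : Int) + i + 1) = ((k + 1 + i : Nat) : Int) by push_cast; ring,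
        show ((k : Int) - i) = ((k - i : Nat) : Int) by omega,
        PySem.List.pyGet?_natCast, PySem.List.pyGet?_natCast] at h
      exact h
  · intro H i hi
    simp only [Function.comp, Bool.not_eq_true', Bool.and_eq_false_iff, decide_eq_false_iff_not,
      bne_eq_false_iff_eq, not_le, not_lt]
    by_cases hb : k + 1 + i < pattern.length
    · refine Or.inr ?_
      rw [show ((k : Int) + i + 1) = ((k + 1 + i : Nat) : Int) by push_cast; ring,
        show ((k : Int) - i) = ((k - i : Nat) : Int) by omega,
        PySem.List.pyGet?_natCast, PySem.List.pyGet?_natCast]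
      exact H i (by omega)
    · exact Or.inl (Or.inr (by omega))

-- The centered window of width 2M is a palindrome exactly when all M pairs around the line match.
theorem pal_iff (pattern : List String) (k M : Nat) (hM1 : M ≤ k + 1)
    (hM2 : k + 1 + M ≤ pattern.length) :
    ((pattern.drop (k + 1 - M)).take (2 * M) = ((pattern.drop (k + 1 - M)).take (2 * M)).reverse) ↔
      (∀ i, i < M → pattern[k + 1 + i]? = pattern[k - i]?) := by
  set w := (pattern.drop (k + 1 - M)).take (2 * M) with hw
  have hlen : w.length = 2 * M := by
    simp only [hw, List.length_take, List.length_drop]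
    omega
  have hwj : ∀ j, w[j]? = if j < 2 * M then pattern[(k + 1 - M) + j]? else none := by
    intro j
    by_cases hj : j < 2 * M
    · rw [if_pos hj, hw]
      rw [List.getElem?_take_of_lt hj, List.getElem?_drop]
    · rw [if_neg hj]
      exact List.getElem?_eq_none (by omega)
  constructor
  · intro hpal i hi
    have h1 := congrArg (fun l => l[M + i]?) hpal
    simp only [] at h1
    rw [List.getElem?_reverse (by omega), hlen] at h1
    rw [hwj, hwj, if_pos (by omega), if_pos (by omega)] at h1
    rw [show (k + 1 - M) + (M + i) = k + 1 + i by omega,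
      show (k + 1 - M) + (2 * M - 1 - (M + i)) = k - i by omega] at h1
    exact h1
  · intro hP
    apply List.ext_getElem?
    intro j
    by_cases hj : j < 2 * M
    · rw [List.getElem?_reverse (by omega), hlen, hwj, hwj, if_pos hj, if_pos (by omega)]
      by_cases hjM : j < M
      · have := hP (M - 1 - j) (by omega)
        rw [show (k + 1 - M) + j = k - (M - 1 - j) by omega,
          show (k + 1 - M) + (2 * M - 1 - j) = k + 1 + (M - 1 - j) by omega]
        exact this.symm
      · have := hP (j - M) (by omega)
        rw [show (k + 1 - M) + j = k + 1 + (j - M) by omega,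
          show (k + 1 - M) + (2 * M - 1 - j) = k - (j - M) by omega]
        exact this
    · rw [hwj, if_neg hj]
      exact (List.getElem?_eq_none (by simp [hlen]; omega)).symm

theorem is_mirror_at_row_spec : Claim_equal_is_mirror_at_row := by
  intro pattern idx _ hpre
  unfold Pre_is_mirror_at_row at hpre
  lift idx to ℕ using hpre with k
  unfold Spec_is_mirror_at_row is_mirror_at_row is_mirror_at_row_alt
  by_cases hg : (k : Int) = (pattern.length : Int) - 1
  · simp [hg]
  · simp only [if_neg hg]
    by_cases hk2 : k + 2 ≤ pattern.length
    · -- idx a genuine interior mirror position: relate both sides to the M matching pairs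
      set M : Nat := min (k + 1) (pattern.length - (k + 1)) with hM
      have hmin : min ((k : Int) + 1) ((pattern.length : Int) - k - 1) = (M : Int) := by
        push_cast [hM]; omega
      rw [hmin]
      have hsl : PySem.List.slice pattern (some ((k : Int) + 1 - M)) (some ((k : Int) + 1 + M)) =
          (pattern.drop (k + 1 - M)).take (2 * M) := by
        rw [PySem.List.slice_toNat pattern (a := (k : Int) + 1 - M) (b := (k : Int) + 1 + M)
          (by omega) (by omega)]
        rw [show ((k : Int) + 1 - M).toNat = k + 1 - M by omega]
        congr 1
        omega
      rw [hsl]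
      apply Bool.eq_iff_iff.mpr
      rw [beq_iff_eq]
      exact (allA_iff pattern k).trans (pal_iff pattern k M (by omega) (by omega)).symm
    · -- idx beyond the pattern: A's guard never fires, B's window is empty
      have hkn : pattern.length ≤ k := by omega
      have hmin : min ((k : Int) + 1) ((pattern.length : Int) - k - 1) =
          (pattern.length : Int) - k - 1 := by omega
      rw [hmin]
      have hsl : PySem.List.slice pattern
          (some ((k : Int) + 1 - ((pattern.length : Int) - k - 1)))
          (some ((k : Int) + 1 + ((pattern.length : Int) - k - 1))) = [] := by
        rw [PySem.List.slice_toNat pattern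
          (a := (k : Int) + 1 - ((pattern.length : Int) - k - 1))
          (b := (k : Int) + 1 + ((pattern.length : Int) - k - 1)) (by omega) (by omega)]
        rw [List.drop_eq_nil_of_le (by omega), List.take_nil]
      rw [hsl]
      rw [show (([] : List String) == ([] : List String).reverse) = true from rfl]
      rw [loopA_eq_all]
      rw [show ((k : Int) + 1) = ((k + 1 : Nat) : Int) by omega,
        PySem.List.pyRange_zero_natCast]
      simp only [List.all_map, List.all_eq_true, List.mem_range]
      intro i _
      simp only [Function.comp, Bool.not_eq_true', Bool.and_eq_false_iff,
        decide_eq_false_iff_not, not_lt]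
      exact Or.inl (Or.inr (by omega))
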